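-- pv_equiv track=rewrite | github.com/MrBrantCode/unitest_baseline | mut_generate/mist_train_cf/cf_93679/solution.py | find_maximum_sum
-- ===== SOURCE A (Python) =====
-- def find_maximum_sum(A):
--     max_sum = []
--
--     for row in A:
--         current_sum = 0
--         max_subarray_sum = 0
--
--         for num in row:
--             current_sum += num
--
--             if current_sum < 0:
--                 current_sum = 0
--
--             if current_sum > max_subarray_sum:
--                 max_subarray_sum = current_sum
--
--         max_sum.append(max_subarray_sum)
--
--     return max_sum
-- ===== SOURCE B (Python) =====
-- def _prefix_sums(row):
--     pref = []
--     last = 0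
--     for num in row:
--         last += num
--         pref.append(last)
--     return pref
--
--
-- def _best_from_prefixes(pref):
--     best = 0
--     low = 0
--     for p in pref:
--         if p - low > best:
--             best = p - low
--         if p < low:
--             low = p
--     return best
--
--
-- def find_maximum_sum(A):
--     return [_best_from_prefixes(_prefix_sums(row)) for row in A]
-- ===== Notes on version B (the rewrite author's own statement) =====
-- stated objective: alternative
-- what changed: Replaces the fused Kadane clamp-to-zero loop with two staged passes per row: first materialize the prefix-sum list, then scan it keeping a running minimum prefix (best = max of p - min_prefix), with the rows handled by a comprehension over helper functions.
import Mathlib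
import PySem

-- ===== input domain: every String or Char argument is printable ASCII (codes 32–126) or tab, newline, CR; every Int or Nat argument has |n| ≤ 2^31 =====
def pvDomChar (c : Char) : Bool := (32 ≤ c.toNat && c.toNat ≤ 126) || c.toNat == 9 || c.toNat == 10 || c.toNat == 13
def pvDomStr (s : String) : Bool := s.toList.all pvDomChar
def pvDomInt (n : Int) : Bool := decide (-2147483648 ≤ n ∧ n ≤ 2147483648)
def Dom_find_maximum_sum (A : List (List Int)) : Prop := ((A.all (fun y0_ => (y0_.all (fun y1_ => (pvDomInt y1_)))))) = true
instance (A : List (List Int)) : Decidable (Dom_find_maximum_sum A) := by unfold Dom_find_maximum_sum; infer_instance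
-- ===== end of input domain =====

-- B computes each row's answer in two staged passes (materialize prefix sums, then scan with a running minimum prefix) instead of A's fused Kadane clamp-to-zero loop; same cost, different decomposition.


-- ===== PORT A =====
-- inner loop of A: state (current_sum, max_subarray_sum)
def pvStepA (st : Int × Int) (num : Int) : Int × Int :=
  let cs := st.1 + num
  let cs := if cs < 0 then 0 else cs
  let ms := if cs > st.2 then cs else st.2
  (cs, ms)

def find_maximum_sum (A : List (List Int)) : List Int :=
  A.foldl (fun acc row => acc ++ [(row.foldl pvStepA (0, 0)).2]) []

-- ===== PORT B =====
-- first pass: the list of prefix sums of the row ('last' is the running total)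
def pvPrefixSums (last : Int) : List Int → List Int
  | [] => []
  | num :: rest => (last + num) :: pvPrefixSums (last + num) rest

-- second pass: scan the prefix sums, keeping best and the running minimum prefix
def pvBestFromPrefixes (best low : Int) : List Int → Int
  | [] => best
  | p :: rest =>
      pvBestFromPrefixes (if p - low > best then p - low else best)
        (if p < low then p else low) rest

def find_maximum_sum_alt (A : List (List Int)) : List Int :=
  A.map (fun row => pvBestFromPrefixes 0 0 (pvPrefixSums 0 row))

-- ===== PRECONDITION & SPEC =====
def Spec_find_maximum_sum (A : List (List Int)) (out : List Int) : Prop := out = find_maximum_sum_alt A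
instance (A : List (List Int)) (out : List Int) : Decidable (Spec_find_maximum_sum A out) := by unfold Spec_find_maximum_sum; infer_instance

-- ===== CLAIM (what is proved, stated in full; the proofs are below) =====
def Claim_equal_find_maximum_sum : Prop := ∀ (A : List (List Int)), Dom_find_maximum_sum A → Spec_find_maximum_sum A (find_maximum_sum A)

-- ===== LEMMAS AND PROOFS =====

-- Invariant tying A's fused state to B's staged scan: A's clamped running sum
-- equals the current prefix total minus the running minimum, bests coincide.
theorem pv_row_eq (row : List Int) (s low a b : Int)
    (h1 : a = s - low) (h2 : 0 ≤ b) :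
    (row.foldl pvStepA (a, b)).2 = pvBestFromPrefixes b low (pvPrefixSums s row) := by
  induction row generalizing s low a b with
  | nil => rfl
  | cons num rest ih =>
    simp only [List.foldl, pvStepA, pvPrefixSums, pvBestFromPrefixes]
    rw [show (if s + num - low > b then s + num - low else b)
          = (if (if a + num < 0 then 0 else a + num) > b
              then (if a + num < 0 then 0 else a + num) else b) from by
        split_ifs <;> omega]
    apply ih <;> split_ifs <;> omega

theorem pv_foldl_acc_eq (A : List (List Int)) (acc : List Int) :
    A.foldl (fun acc row => acc ++ [(row.foldl pvStepA (0, 0)).2]) acc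
      = acc ++ A.map (fun row => pvBestFromPrefixes 0 0 (pvPrefixSums 0 row)) := by
  induction A generalizing acc with
  | nil => simp
  | cons row rest ih =>
    simp only [List.foldl, List.map]
    rw [ih, pv_row_eq row 0 0 0 0 rfl le_rfl]
    simp

-- ===== VERDICT (by name: the statement is the Claim_ definition above) =====
theorem find_maximum_sum_spec : Claim_equal_find_maximum_sum := by
  intro A _
  unfold Spec_find_maximum_sum find_maximum_sum find_maximum_sum_alt
  simpa using pv_foldl_acc_eq A []
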